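-- pv_equiv track=rewrite | github.com/HyowonKim1116/BOJ-PS | PS#4659.py | continue3
-- ===== SOURCE A (Python) =====
-- vowel = {'a', 'e', 'i', 'o', 'u'}
--
-- def continue3(word: str):
--     v, c = 0, 0
--     for w in word:
--         if w in vowel:
--             v += 1
--             c = 0
--         else:
--             c += 1
--             v = 0
--         if (v == 3) or (c == 3):
--             return 0
--     return 1
-- ===== SOURCE B (Python) =====
-- from itertools import groupby
--
-- vowel = {'a', 'e', 'i', 'o', 'u'}
--
-- def continue3(word: str):
--     for _, g in groupby(word, key=lambda ch: ch in vowel):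
--         if sum(1 for _ in g) >= 3:
--             return 0
--     return 1
-- ===== Notes on version B (the rewrite author's own statement) =====
-- stated objective: idiomatic
-- what changed: Replaced the running vowel/consonant counters with itertools.groupby: partition the word into maximal same-type runs and return 0 iff some run has length >= 3.
import Mathlib
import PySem

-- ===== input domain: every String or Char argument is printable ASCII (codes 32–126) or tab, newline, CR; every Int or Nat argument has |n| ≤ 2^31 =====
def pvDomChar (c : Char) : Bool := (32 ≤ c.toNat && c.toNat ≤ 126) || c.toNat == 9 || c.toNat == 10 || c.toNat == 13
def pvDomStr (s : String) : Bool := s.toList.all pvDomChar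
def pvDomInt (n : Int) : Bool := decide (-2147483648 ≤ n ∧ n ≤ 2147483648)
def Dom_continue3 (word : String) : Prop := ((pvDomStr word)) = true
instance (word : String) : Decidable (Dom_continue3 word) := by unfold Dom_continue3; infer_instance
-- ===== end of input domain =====

-- B replaces A's running vowel/consonant counters with a groupby-style decomposition into
-- maximal same-type runs, returning 0 iff some run has length ≥ 3 (idiomatic; same cost).

-- ===== PORT A =====
-- vowel = {'a','e','i','o','u'}  (a set of the five distinct letters)
def vowel : List Char := ['a', 'e', 'i', 'o', 'u']

-- the for-loop of A with its running counters v, c and early return 0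
def contA : List Char → Int → Int → Int
  | [], _, _ => 1
  | w :: ws, v, c =>
    let vc : Int × Int := if vowel.contains w then (v + 1, 0) else (0, c + 1)
    if vc.1 = 3 ∨ vc.2 = 3 then 0 else contA ws vc.1 vc.2

def continue3 (word : String) : Int := contA word.toList 0 0

-- ===== PORT B =====
-- key=lambda ch: ch in vowel
def isVowel (ch : Char) : Bool := vowel.contains ch

-- itertools.groupby: split into maximal runs of equal key
def runsB (l : List Char) : List (List Char) :=
  match l with
  | [] => []
  | x :: xs =>
    (x :: xs.takeWhile (fun y => isVowel y == isVowel x)) ::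
      runsB (xs.dropWhile (fun y => isVowel y == isVowel x))
termination_by l.length
decreasing_by
  simpa using Nat.lt_succ_of_le (List.length_dropWhile_le _ _)

-- the for-loop over the groups with early return 0, else 1
def continue3_alt (word : String) : Int :=
  if (runsB word.toList).any (fun g => 3 ≤ g.length) then 0 else 1

-- ===== PRECONDITION & SPEC =====
def Spec_continue3 (word : String) (out : Int) : Prop := out = continue3_alt word
instance (word : String) (out : Int) : Decidable (Spec_continue3 word out) := by unfold Spec_continue3; infer_instance

-- ===== CLAIM (what is proved, stated in full; the proofs are below) =====
def Claim_equal_continue3 : Prop := ∀ (word : String), Dom_continue3 word → Spec_continue3 word (continue3 word)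

-- ===== LEMMAS AND PROOFS =====

-- A's counter state when the trailing run of the processed prefix has type t and length m
def stv (t : Bool) (m : Nat) : Int × Int := if t then ((m : Int), 0) else (0, (m : Int))

-- consuming one whole same-type run from a matching state
theorem runGo (r : List Char) : ∀ (rest : List Char) (t : Bool) (m : Nat), m ≤ 2 →
    (∀ x ∈ r, isVowel x = t) →
    contA (r ++ rest) (stv t m).1 (stv t m).2 =
      if 3 ≤ m + r.length then 0
      else contA rest (stv t (m + r.length)).1 (stv t (m + r.length)).2 := by
  induction r with
  | nil =>
    intro rest t m hm _
    rw [if_neg (by simp; omega)]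
    simp
  | cons x r ih =>
    intro rest t m hm hall
    have hx : isVowel x = t := hall x (List.mem_cons_self ..)
    have hall' : ∀ y ∈ r, isVowel y = t := fun y hy => hall y (List.mem_cons_of_mem _ hy)
    cases t with
    | true =>
      have hc : vowel.contains x = true := hx
      simp only [List.cons_append, contA, stv, if_true, hc, List.length_cons]
      by_cases h3 : m = 2
      · subst h3
        norm_num
        intro h
        exact absurd h (by omega)
      · have := ih rest true (m + 1) (by omega) hall'
        simp only [stv, if_true] at this
        push_cast at this
        rw [if_neg (by simp; omega)]
        rw [this]
        rw [show m + 1 + r.length = m + (r.length + 1) from by omega]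
        push_cast
        ring_nf
    | false =>
      have hc : vowel.contains x = false := hx
      simp only [List.cons_append, contA, stv, Bool.false_eq_true, if_false, hc,
        List.length_cons]
      by_cases h3 : m = 2
      · subst h3
        norm_num
        intro h
        exact absurd h (by omega)
      · have := ih rest false (m + 1) (by omega) hall'
        simp only [stv, Bool.false_eq_true, if_false] at this
        push_cast at this
        rw [if_neg (by simp; omega)]
        rw [this]
        rw [show m + 1 + r.length = m + (r.length + 1) from by omega]
        push_cast
        ring_nf

theorem main_lemma : ∀ (n : Nat) (l : List Char), l.length ≤ n → ∀ (t : Bool) (m : Nat), m ≤ 2 →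
    (∀ x, l.head? = some x → isVowel x ≠ t) →
    contA l (stv t m).1 (stv t m).2 =
      if (runsB l).any (fun g => 3 ≤ g.length) then 0 else 1 := by
  intro n
  induction n with
  | zero =>
    intro l hl t m _ _
    have hnil : l = [] := List.length_eq_zero_iff.mp (Nat.le_zero.mp hl)
    subst hnil
    simp [contA, runsB]
  | succ n ih =>
    intro l hl t m hm hhd
    cases l with
    | nil => simp [contA, runsB]
    | cons x xs =>
      have hx : isVowel x ≠ t := hhd x rfl
      have hruns : runsB (x :: xs) =
          (x :: xs.takeWhile (fun y => isVowel y == isVowel x)) ::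
            runsB (xs.dropWhile (fun y => isVowel y == isVowel x)) := by
        rw [runsB]
      have step1 : contA (x :: xs) (stv t m).1 (stv t m).2 =
          contA xs (stv (isVowel x) 1).1 (stv (isVowel x) 1).2 := by
        cases hb : isVowel x with
        | true =>
          have ht : t = false := by
            cases t
            · rfl
            · exact absurd (hb : isVowel x = true) hx
          subst ht
          have hmem : x ∈ vowel := by simpa [isVowel] using hb
          norm_num [contA, stv, hmem]
        | false =>
          have ht : t = true := by
            cases t
            · exact absurd (hb : isVowel x = false) hx
            · rfl
          subst ht
          have hmem : x ∉ vowel := by simpa [isVowel] using hb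
          norm_num [contA, stv, hmem]
      have halltk : ∀ y ∈ xs.takeWhile (fun y => isVowel y == isVowel x),
          isVowel y = isVowel x := by
        intro y hy
        simpa using List.mem_takeWhile_imp hy
      have hsplit : xs = xs.takeWhile (fun y => isVowel y == isVowel x) ++
          xs.dropWhile (fun y => isVowel y == isVowel x) :=
        (List.takeWhile_append_dropWhile ..).symm
      have hrun := runGo (xs.takeWhile (fun y => isVowel y == isVowel x))
        (xs.dropWhile (fun y => isVowel y == isVowel x)) (isVowel x) 1 (by omega) halltk
      rw [step1, hruns]
      conv_lhs => rw [hsplit]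
      rw [hrun]
      by_cases hlong : 3 ≤ 1 + (xs.takeWhile (fun y => isVowel y == isVowel x)).length
      · rw [if_pos hlong, if_pos (by simp [List.length_cons]; omega)]
      · rw [if_neg hlong]
        have hdrlen : (xs.dropWhile (fun y => isVowel y == isVowel x)).length ≤ n := by
          have h1 := List.length_dropWhile_le (fun y => isVowel y == isVowel x) xs
          have h2 : xs.length ≤ n := by simpa using Nat.le_of_succ_le_succ hl
          omega
        have hdrhd : ∀ y, (xs.dropWhile (fun y => isVowel y == isVowel x)).head? = some y →
            isVowel y ≠ isVowel x := by
          intro y hy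
          have := List.head?_dropWhile_not (fun y => isVowel y == isVowel x) xs
          rw [hy] at this
          simpa using this
        rw [ih _ hdrlen (isVowel x) (1 + (xs.takeWhile (fun y => isVowel y == isVowel x)).length)
          (by omega) hdrhd]
        simp only [List.any_cons, List.length_cons]
        have hfalse : ¬ 3 ≤ (xs.takeWhile (fun y => isVowel y == isVowel x)).length + 1 := by
          omega
        simp [hfalse]

-- ===== VERDICT (by name: the statement is the Claim_ definition above) =====
theorem continue3_spec : Claim_equal_continue3 := by
  intro word _
  unfold Spec_continue3 continue3 continue3_alt
  cases hl : word.toList with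
  | nil => simp [contA, runsB]
  | cons x xs =>
    have hm := main_lemma (x :: xs).length (x :: xs) (le_refl _) (!(isVowel x)) 0 (by omega)
      (by
        intro y hy
        rw [List.head?_cons, Option.some.injEq] at hy
        subst hy
        cases isVowel x <;> simp)
    cases hb : isVowel x with
    | true => rw [hb] at hm; simpa [stv] using hm
    | false => rw [hb] at hm; simpa [stv] using hm
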